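-- pv_equiv track=rewrite | github.com/danroberts728/Project-Euler-Answers | python/Problem46.py | IsGoldbachComposite
-- ===== SOURCE A (Python) =====
-- def gen_primes():
--     D = {}
--     q = 2
--
--     while True:
--         if q not in D:
--             yield q
--             D[q * q] = [q]
--         else:
--             for p in D[q]:
--                 D.setdefault(p + q, []).append(p)
--             del D[q]
--         q += 1
--
-- def IsGoldbachComposite(n):
--     primes = gen_primes()
--     # ans = P + 2 * A**2
--     ans = 0
--     A = 0
--     P = 0
--     while P < n:
--         P = next(primes)
--         for A in range(0,n):
--             A += 1
--             ans = P + 2 * A**2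
--             if ans == n:
--                 return True
--             if ans > n:
--                 break
--     else:
--         return False
-- ===== SOURCE B (Python) =====
-- def _is_prime(m):
--     if m < 2:
--         return False
--     d = 2
--     while d * d <= m:
--         if m % d == 0:
--             return False
--         d += 1
--     return True
--
-- def IsGoldbachComposite(n):
--     a = 1
--     while 2 * a * a <= n - 2:
--         if _is_prime(n - 2 * a * a):
--             return True
--         a += 1
--     return False
-- ===== Notes on version B (the rewrite author's own statement) =====
-- stated objective: faster
-- what changed: A generates every prime below n with an incremental dict sieve and, for each prime, scans the square term upward; B loops once over the square term a (2*a*a <= n-2) and tests n-2*a*a for primality by trial division, eliminating the prime generator and the nested scan.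
import Mathlib
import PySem

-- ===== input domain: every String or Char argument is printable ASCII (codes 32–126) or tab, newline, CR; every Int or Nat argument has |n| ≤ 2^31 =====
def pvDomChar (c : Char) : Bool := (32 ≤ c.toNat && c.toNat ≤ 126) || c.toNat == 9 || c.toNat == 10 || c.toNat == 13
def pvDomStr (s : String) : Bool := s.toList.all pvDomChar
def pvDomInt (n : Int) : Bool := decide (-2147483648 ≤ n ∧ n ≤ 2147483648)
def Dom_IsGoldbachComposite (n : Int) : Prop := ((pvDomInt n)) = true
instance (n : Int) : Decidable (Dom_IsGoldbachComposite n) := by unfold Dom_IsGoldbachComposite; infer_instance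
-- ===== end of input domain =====

-- B replaces A's incremental-sieve prime generator with nested search by a single loop over the
-- square term with trial-division primality, which a timing run measured as much faster.

-- ===== PORT A =====
-- A's generator gen_primes is ported as an explicit state machine (sieve dict D, counter q);
-- the pending `D[q*q] = [q]` of a suspended generator is applied together with the yield,
-- which is unobservable from outside the generator.  Fuel arguments only make the searches
-- total; the proofs show they are never exhausted on the executed paths.

-- The generator's dict D is only ever used for point lookups, point updates and point
-- deletions — it is never iterated — so a hash map models each of its operations exactly
-- (an association list made evaluation of the port infeasibly slow on sampled inputs).
-- one resumption of gen_primes: advance q until a prime is yielded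
def pvNextPrime : Nat → Std.HashMap Int (List Int) → Int → Option (Int × Std.HashMap Int (List Int) × Int)
  | 0, _, _ => none
  | fuel+1, d, q =>
    if d.contains q = false then
      some (q, d.insert (q * q) [q], q + 1)
    else
      -- for p in D[q]: D.setdefault(p + q, []).append(p);  del D[q]
      pvNextPrime fuel
        (((d.getD q []).foldl (fun d2 p => d2.insert (p + q) (d2.getD (p + q) [] ++ [p])) d).erase q)
        (q + 1)

-- the inner `for A in range(0, n)` loop of A (A += 1 at the top of the body);
-- Python's range is lazy, so the loop is iterated by counting a = 0, 1, … while a < n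
-- (exact for step 1); the fuel is exactly the n iterations range(0, n) yields
def pvInnerA (n P : Int) : Nat → Int → Bool
  | 0, _ => false
  | fuel+1, a =>
    if a < n then
      let A := a + 1
      let ans := P + 2 * A ^ 2
      if ans = n then true
      else if ans > n then false
      else pvInnerA n P fuel (a + 1)
    else false

-- the outer `while P < n` loop (its `else:` returns False when the condition fails)
def pvOuterA : Nat → Std.HashMap Int (List Int) → Int → Int → Int → Bool
  | 0, _, _, _, _ => false
  | fuel+1, d, q, P, n =>
    if P < n then
      match pvNextPrime (2 * n.toNat + 4) d q with
      | none => false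
      | some (p, d', q') =>
        if pvInnerA n p n.toNat 0 then true
        else pvOuterA fuel d' q' p n
    else false

def IsGoldbachComposite (n : Int) : Bool :=
  pvOuterA (n.toNat + 2) (∅ : Std.HashMap Int (List Int)) 2 0 n

-- ===== PORT B =====
-- `while d * d <= m: if m % d == 0: return False; d += 1` of _is_prime
def pvTrial : Nat → Int → Int → Bool
  | 0, _, _ => true
  | fuel+1, m, d =>
    if d * d ≤ m then
      if PySem.Int.mod m d = 0 then false else pvTrial fuel m (d + 1)
    else true

def pvIsPrimeB (m : Int) : Bool :=
  if m < 2 then false else pvTrial (m.toNat + 2) m 2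

-- `while 2 * a * a <= n - 2: …; a += 1`
def pvAltLoop : Nat → Int → Int → Bool
  | 0, _, _ => false
  | fuel+1, n, a =>
    if 2 * a * a ≤ n - 2 then
      if pvIsPrimeB (n - 2 * a * a) then true else pvAltLoop fuel n (a + 1)
    else false

def IsGoldbachComposite_alt (n : Int) : Bool := pvAltLoop (n.toNat + 2) n 1

-- ===== PRECONDITION & SPEC =====
def Spec_IsGoldbachComposite (n : Int) (out : Bool) : Prop := out = IsGoldbachComposite_alt n
instance (n : Int) (out : Bool) : Decidable (Spec_IsGoldbachComposite n out) := by unfold Spec_IsGoldbachComposite; infer_instance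

-- ===== CLAIM (what is proved, stated in full; the proofs are below) =====
def Claim_equal_IsGoldbachComposite : Prop := ∀ (n : Int), Dom_IsGoldbachComposite n → Spec_IsGoldbachComposite n (IsGoldbachComposite n)

-- ===== LEMMAS AND PROOFS =====

-- `p is a prime` for a Python int
def PrimeI (p : Int) : Prop := Nat.Prime p.toNat

-- the common characterisation: n = p + 2*k^2 for a prime p and k ≥ 1
def GoldB (n : Int) : Prop := ∃ p k : Int, PrimeI p ∧ 1 ≤ k ∧ p + 2 * k ^ 2 = n

theorem primeI_two_le {p : Int} (h : PrimeI p) : 2 ≤ p := by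
  unfold PrimeI at h
  have h2 := h.two_le
  omega

theorem not_primeI_iff {q : Int} (hq : 2 ≤ q) :
    ¬ PrimeI q ↔ ∃ p : Int, PrimeI p ∧ p ∣ q ∧ p * p ≤ q := by
  constructor
  · intro hnp
    have hm : 2 ≤ q.toNat := by omega
    have hne1 : q.toNat ≠ 1 := by omega
    have hpf : Nat.Prime (q.toNat.minFac) := Nat.minFac_prime hne1
    refine ⟨(q.toNat.minFac : Int), ?_, ?_, ?_⟩
    · unfold PrimeI; simpa using hpf
    · have hdvd : q.toNat.minFac ∣ q.toNat := Nat.minFac_dvd _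
      have : (q.toNat.minFac : Int) ∣ (q.toNat : Int) := Int.natCast_dvd_natCast.mpr hdvd
      rwa [Int.toNat_of_nonneg (by omega : (0:Int) ≤ q)] at this
    · have hsq : q.toNat.minFac ^ 2 ≤ q.toNat := Nat.minFac_sq_le_self (by omega) hnp
      have : ((q.toNat.minFac : Int)) ^ 2 ≤ (q.toNat : Int) := by exact_mod_cast hsq
      rw [Int.toNat_of_nonneg (by omega : (0:Int) ≤ q)] at this
      nlinarith [this]
  · rintro ⟨p, hp, hdvd, hsq⟩ hq'
    have hp2 : 2 ≤ p := primeI_two_le hp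
    have hplt : p < q := by nlinarith
    have h0p : (0:Int) ≤ p := by omega
    have h0q : (0:Int) ≤ q := by omega
    have hdn : p.toNat ∣ q.toNat := by
      rw [← Int.toNat_of_nonneg h0p, ← Int.toNat_of_nonneg h0q] at hdvd
      exact_mod_cast hdvd
    rcases (Nat.Prime.eq_one_or_self_of_dvd hq' _ hdn) with h1 | h1
    · omega
    · have : p = q := by omega
      subst this
      nlinarith

theorem primeI_int_prime {p : Int} (h : PrimeI p) : Prime p := by
  rw [Int.prime_iff_natAbs_prime]
  have h2 := primeI_two_le h
  have e : p.natAbs = p.toNat := by omega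
  rw [e]; exact h

theorem dvd_toNat {p q : Int} (h0 : 0 ≤ p) (h1 : 0 ≤ q) (h : p ∣ q) : p.toNat ∣ q.toNat := by
  rw [← Int.toNat_of_nonneg h0, ← Int.toNat_of_nonneg h1] at h
  exact_mod_cast h

-- ---------- the sieve invariant ----------

def SieveInv (d : Std.HashMap Int (List Int)) (q : Int) : Prop :=
  2 ≤ q ∧
  (∀ k, d.contains k = true → d.getD k [] ≠ []) ∧
  (∀ k p, p ∈ d.getD k [] →
      PrimeI p ∧ p < q ∧ p ∣ k ∧ p * p ≤ k ∧ q ≤ k ∧ (k - p < q ∨ k = p * p)) ∧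
  (∀ p, PrimeI p → p < q → ∃ k, p ∈ d.getD k [])

theorem getD_insert_dict (d : Std.HashMap Int (List Int)) (k k' : Int) (v : List Int) :
    (d.insert k v).getD k' [] = if k' = k then v else d.getD k' [] := by
  rw [Std.HashMap.getD_insert]
  by_cases h : k' = k
  · subst h; simp
  · rw [if_neg h, if_neg (by simpa using Ne.symm h)]
theorem contains_insert_dict (d : Std.HashMap Int (List Int)) (k k' : Int) (v : List Int) :
    (d.insert k v).contains k' = (k' == k || d.contains k') := by
  rw [Std.HashMap.contains_insert]
  by_cases h : k' = k
  · subst h; simp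
  · have h1 : (k == k') = false := by simpa using Ne.symm h
    have h2 : (k' == k) = false := by simpa using h
    rw [h1, h2]
theorem getD_erase_dict (d : Std.HashMap Int (List Int)) (k k' : Int) :
    (d.erase k).getD k' [] = if k' = k then [] else d.getD k' [] := by
  rw [Std.HashMap.getD_erase]
  by_cases h : k' = k
  · subst h; simp
  · rw [if_neg h, if_neg (by simpa using Ne.symm h)]
theorem contains_erase_dict (d : Std.HashMap Int (List Int)) (k k' : Int) :
    (d.erase k).contains k' = (decide (k' ≠ k) && d.contains k') := by
  rw [Std.HashMap.contains_erase]
  by_cases h : k' = k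
  · subst h; simp
  · have h1 : (k == k') = false := by simpa using Ne.symm h
    rw [h1]
    simp [h]

theorem getD_not_contains_dict {d : Std.HashMap Int (List Int)} {k : Int}
    (h : d.contains k = false) : d.getD k [] = [] :=
  Std.HashMap.getD_eq_fallback (by simpa using h)

theorem getD_sieve_fold (ps : List Int) (d : Std.HashMap Int (List Int)) (q c : Int) :
    (ps.foldl (fun d2 p => d2.insert (p + q) (d2.getD (p + q) [] ++ [p])) d).getD c [] =
      d.getD c [] ++ ps.filter (fun p => p + q = c) := by
  induction ps generalizing d with
  | nil => simp
  | cons p rest ih =>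
    simp only [List.foldl_cons, List.filter_cons]
    rw [ih]
    by_cases hpc : p + q = c
    · rw [getD_insert_dict]
      simp [hpc]
    · rw [getD_insert_dict]
      simp [hpc, Ne.symm hpc]

theorem contains_sieve_fold (ps : List Int) (d : Std.HashMap Int (List Int)) (q c : Int) :
    (ps.foldl (fun d2 p => d2.insert (p + q) (d2.getD (p + q) [] ++ [p])) d).contains c =
      (d.contains c || ps.any (fun p => p + q = c)) := by
  induction ps generalizing d with
  | nil => simp
  | cons p rest ih =>
    simp only [List.foldl_cons, List.any_cons]
    rw [ih, contains_insert_dict]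
    by_cases hpc : p + q = c
    · simp [hpc]
    · have : (c == p + q) = false := by simp; omega
      simp [hpc, this, eq_comm]

theorem inv_empty : SieveInv (∅ : Std.HashMap Int (List Int)) 2 := by
  refine ⟨le_refl 2, ?_, ?_, ?_⟩
  · intro k hk; simp at hk
  · intro k p hp; simp at hp
  · intro p hp hlt
    exact absurd (primeI_two_le hp) (by omega)

-- if q has no sieve entry it is prime, and registering q*q preserves the invariant
theorem inv_prime_step {d : Std.HashMap Int (List Int)} {q : Int}
    (h : SieveInv d q) (hq : d.contains q = false) :
    PrimeI q ∧ SieveInv (d.insert (q * q) [q]) (q + 1) := by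
  obtain ⟨hq2, hcne, hent, hcomp⟩ := h
  have hgq : d.getD q [] = [] := getD_not_contains_dict hq
  have hPq : PrimeI q := by
    by_contra hnp
    obtain ⟨p, hp, hdvd, hsq⟩ := (not_primeI_iff hq2).mp hnp
    have hp2 := primeI_two_le hp
    have hplt : p < q := by nlinarith
    obtain ⟨k, hpk⟩ := hcomp p hp hplt
    obtain ⟨_, _, pdk, ppk, qk, least⟩ := hent k p hpk
    have hkq : k = q := by
      rcases least with hle | heq
      · by_contra hne
        have hqk : q < k := lt_of_le_of_ne qk (Ne.symm hne)
        have hdq : p ∣ (k - q) := dvd_sub pdk hdvd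
        have : p ≤ k - q := Int.le_of_dvd (by omega) hdq
        omega
      · nlinarith
    rw [hkq, hgq] at hpk
    simp at hpk
  refine ⟨hPq, ?_⟩
  have hq2' : 2 ≤ q := hq2
  have hfresh : d.contains (q * q) = false := by
    by_contra hc
    have hc' : d.contains (q * q) = true := by simpa using hc
    obtain ⟨p', hp'⟩ := List.exists_mem_of_ne_nil _ (hcne _ hc')
    obtain ⟨hp'P, hp'lt, p'dk, _, _, _⟩ := hent _ _ hp'
    have hp'2 := primeI_two_le hp'P
    have hp'q : p' ∣ q := by
      rcases (primeI_int_prime hp'P).dvd_mul.mp p'dk with h | h <;> exact h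
    have hdn : p'.toNat ∣ q.toNat := dvd_toNat (by omega) (by omega) hp'q
    rcases Nat.Prime.eq_one_or_self_of_dvd hPq _ hdn with h1 | h1 <;> omega
  refine ⟨by omega, ?_, ?_, ?_⟩
  · intro k hk
    rw [contains_insert_dict] at hk
    rw [getD_insert_dict]
    by_cases hkq : k = q * q
    · simp [hkq]
    · rw [if_neg hkq]
      apply hcne
      simpa [hkq] using hk
  · intro k p hp
    rw [getD_insert_dict] at hp
    by_cases hkq : k = q * q
    · rw [if_pos hkq] at hp
      simp at hp
      subst hp hkq
      exact ⟨hPq, by omega, dvd_mul_left p p, le_refl _, by nlinarith, Or.inr rfl⟩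
    · rw [if_neg hkq] at hp
      obtain ⟨h1, h2, h3, h4, h5, h6⟩ := hent k p hp
      have hkne : k ≠ q := by
        intro e; rw [e, hgq] at hp; simp at hp
      refine ⟨h1, by omega, h3, h4, by omega, ?_⟩
      rcases h6 with h6 | h6
      · exact Or.inl (by omega)
      · exact Or.inr h6
  · intro p hpP hplt
    by_cases hpq : p = q
    · exact ⟨q * q, by rw [getD_insert_dict, if_pos rfl]; simp [hpq]⟩
    · have hlt' : p < q := by omega
      obtain ⟨k, hk⟩ := hcomp p hpP hlt'
      refine ⟨k, ?_⟩
      rw [getD_insert_dict]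
      have hkne : k ≠ q * q := by
        intro e
        rw [e, getD_not_contains_dict hfresh] at hk
        simp at hk
      rw [if_neg hkne]; exact hk

-- if q has a sieve entry it is composite, and moving its primes forward preserves the invariant
theorem inv_comp_step {d : Std.HashMap Int (List Int)} {q : Int}
    (h : SieveInv d q) (hq : d.contains q = true) :
    ¬ PrimeI q ∧
      SieveInv (((d.getD q []).foldl (fun d2 p => d2.insert (p + q) (d2.getD (p + q) [] ++ [p])) d).erase q) (q + 1) := by
  obtain ⟨hq2, hcne, hent, hcomp⟩ := h
  have hpsne : d.getD q [] ≠ [] := hcne q hq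
  have hnotP : ¬ PrimeI q := by
    obtain ⟨p, hpmem⟩ := List.exists_mem_of_ne_nil _ hpsne
    obtain ⟨h1, _, h3, h4, _, _⟩ := hent q p hpmem
    exact (not_primeI_iff hq2).mpr ⟨p, h1, h3, h4⟩
  refine ⟨hnotP, ?_⟩
  have hget : ∀ c, (((d.getD q []).foldl (fun d2 p => d2.insert (p + q) (d2.getD (p + q) [] ++ [p])) d).erase q).getD c []
      = if c = q then [] else d.getD c [] ++ (d.getD q []).filter (fun p => p + q = c) := by
    intro c
    rw [getD_erase_dict, getD_sieve_fold]
  have hcont : ∀ c, (((d.getD q []).foldl (fun d2 p => d2.insert (p + q) (d2.getD (p + q) [] ++ [p])) d).erase q).contains c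
      = (decide (c ≠ q) && (d.contains c || (d.getD q []).any (fun p => p + q = c))) := by
    intro c
    rw [contains_erase_dict, contains_sieve_fold]
  refine ⟨by omega, ?_, ?_, ?_⟩
  · intro k hk
    rw [hcont] at hk
    rw [hget]
    by_cases hkq : k = q
    · simp [hkq] at hk
    · rw [if_neg hkq]
      simp only [hkq, ne_eq, not_false_eq_true, decide_true, Bool.true_and, Bool.or_eq_true] at hk
      rcases hk with hk | hk
      · intro e
        rcases List.append_eq_nil_iff.mp e with ⟨e1, _⟩
        exact hcne k hk e1
      · intro e
        rcases List.append_eq_nil_iff.mp e with ⟨_, e2⟩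
        obtain ⟨p, hpmem, hpk⟩ := List.any_eq_true.mp hk
        have : p ∈ (d.getD q []).filter (fun p => p + q = k) := List.mem_filter.mpr ⟨hpmem, hpk⟩
        rw [e2] at this
        simp at this
  · intro k p hp
    rw [hget] at hp
    by_cases hkq : k = q
    · rw [if_pos hkq] at hp; simp at hp
    · rw [if_neg hkq] at hp
      rcases List.mem_append.mp hp with hmem | hmem
      · obtain ⟨h1, h2, h3, h4, h5, h6⟩ := hent k p hmem
        refine ⟨h1, by omega, h3, h4, by omega, ?_⟩
        rcases h6 with h6 | h6
        · exact Or.inl (by omega)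
        · exact Or.inr h6
      · obtain ⟨hmem', heq'⟩ := List.mem_filter.mp hmem
        have heq : p + q = k := by simpa using heq'
        obtain ⟨h1, h2, h3, h4, h5, h6⟩ := hent q p hmem'
        have hp2 := primeI_two_le h1
        refine ⟨h1, by omega, ?_, by nlinarith, by omega, Or.inl (by omega)⟩
        rw [← heq]
        exact dvd_add (dvd_refl p) h3
  · intro p hpP hplt
    have hpq : p ≠ q := fun e => hnotP (e ▸ hpP)
    have hplt' : p < q := by omega
    obtain ⟨k, hk⟩ := hcomp p hpP hplt'
    by_cases hkq : k = q
    · refine ⟨p + q, ?_⟩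
      rw [hget]
      have hne : p + q ≠ q := by have := primeI_two_le hpP; omega
      rw [if_neg hne]
      exact List.mem_append_right _ (List.mem_filter.mpr ⟨hkq ▸ hk, by simp⟩)
    · refine ⟨k, ?_⟩
      rw [hget, if_neg hkq]
      exact List.mem_append_left _ hk

theorem nextPrime_correct : ∀ (fuel : Nat) (d : Std.HashMap Int (List Int)) (q : Int),
    SieveInv d q → (∃ r : Int, PrimeI r ∧ q ≤ r ∧ r < q + fuel) →
    ∃ p d', pvNextPrime fuel d q = some (p, d', p + 1) ∧
      PrimeI p ∧ q ≤ p ∧ (∀ r, PrimeI r → q ≤ r → p ≤ r) ∧ SieveInv d' (p + 1) := by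
  intro fuel
  induction fuel with
  | zero =>
    intro d q _ hw
    obtain ⟨r, _, hr1, hr2⟩ := hw
    simp at hr2
    omega
  | succ fuel ih =>
    intro d q hInv hw
    by_cases hc : d.contains q = false
    · obtain ⟨hPq, hinv'⟩ := inv_prime_step hInv hc
      refine ⟨q, d.insert (q * q) [q], ?_, hPq, le_refl q, fun r _ hr => hr, hinv'⟩
      simp [pvNextPrime, hc]
    · have hc' : d.contains q = true := by simpa using hc
      obtain ⟨hnp, hinv'⟩ := inv_comp_step hInv hc'
      obtain ⟨r, hrP, hr1, hr2⟩ := hw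
      have hrq : r ≠ q := fun e => hnp (e ▸ hrP)
      obtain ⟨p, d', heq, hP, hge, hleast, hinv''⟩ := ih _ _ hinv'
        ⟨r, hrP, by omega, by push_cast at hr2 ⊢; omega⟩
      refine ⟨p, d', ?_, hP, by omega, ?_, hinv''⟩
      · simp only [pvNextPrime, hc']
        rw [if_neg (by simp)]
        exact heq
      · intro r' hr'P hr'ge
        have : r' ≠ q := fun e => hnp (e ▸ hr'P)
        exact hleast r' hr'P (by omega)

-- ---------- the inner loop ----------

theorem innerA_correct (n p : Int) (hp : 2 ≤ p) : ∀ (fm : Nat) (j : Int),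
    (n - j).toNat ≤ fm → 0 ≤ j → j ≤ n →
    (∀ k, 1 ≤ k → k ≤ j → p + 2 * k ^ 2 ≠ n) →
    (pvInnerA n p fm j = true ↔ ∃ k, 1 ≤ k ∧ p + 2 * k ^ 2 = n) := by
  intro fm
  induction fm with
  | zero =>
    intro j hfm h0 h1 hcov
    have hj : j = n := by omega
    subst hj
    simp only [pvInnerA, Bool.false_eq_true, false_iff]
    rintro ⟨k, hk1, hke⟩
    by_cases hkj : k ≤ j
    · exact hcov k hk1 hkj hke
    · nlinarith
  | succ fm ih =>
    intro j hfm h0 h1 hcov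
    by_cases hjn : j < n
    · by_cases he : p + 2 * (j + 1) ^ 2 = n
      · have hr : pvInnerA n p (fm + 1) j = true := by
          simp [pvInnerA, hjn, he]
        rw [hr]
        simp only [true_iff]
        exact ⟨j + 1, by omega, he⟩
      · by_cases hg : p + 2 * (j + 1) ^ 2 > n
        · simp only [pvInnerA, if_pos hjn, if_neg he, if_pos hg, Bool.false_eq_true, false_iff]
          rintro ⟨k, hk1, hke⟩
          by_cases hkj : k ≤ j
          · exact hcov k hk1 hkj hke
          · have hk : j + 1 ≤ k := by omega
            nlinarith
        · have hred : pvInnerA n p (fm + 1) j = pvInnerA n p fm (j + 1) := by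
            simp only [pvInnerA, if_pos hjn, if_neg he, if_neg hg]
          rw [hred]
          apply ih (j + 1) (by omega) (by omega) (by omega)
          intro k hk1 hk2 hke
          by_cases hkj : k ≤ j
          · exact hcov k hk1 hkj hke
          · have : k = j + 1 := by omega
            rw [this] at hke
            exact he hke
    · simp only [pvInnerA, if_neg hjn, Bool.false_eq_true, false_iff]
      rintro ⟨k, hk1, hke⟩
      by_cases hkj : k ≤ j
      · exact hcov k hk1 hkj hke
      · have hj : j = n := by omega
        subst hj
        nlinarith

-- ---------- the outer loop ----------

theorem outerA_correct : ∀ (fuel : Nat) (d : Std.HashMap Int (List Int)) (q P n : Int),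
    SieveInv d q → 0 ≤ P → P < q → q ≤ P + 2 →
    (∀ r k : Int, PrimeI r → r < q → 1 ≤ k → r + 2 * k ^ 2 ≠ n) →
    (n - P).toNat < fuel →
    (pvOuterA fuel d q P n = true ↔ GoldB n) := by
  intro fuel
  induction fuel with
  | zero =>
    intro d q P n _ _ _ _ _ hfu
    exact absurd hfu (Nat.not_lt_zero _)
  | succ fuel ih =>
    intro d q P n hInv hP0 hPq hqP hcov hfu
    by_cases hPn : P < n
    · have hq2 : 2 ≤ q := hInv.1
      obtain ⟨rn, hrnP, hrgt, hrle⟩ := Nat.exists_prime_lt_and_le_two_mul q.toNat (by omega)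
      have hwit : ∃ r : Int, PrimeI r ∧ q ≤ r ∧ r < q + ((2 * n.toNat + 4 : Nat) : Int) := by
        refine ⟨(rn : Int), ?_, by omega, by push_cast; omega⟩
        unfold PrimeI
        simpa using hrnP
      obtain ⟨p, d', heq, hpP, hpge, hleast, hinv'⟩ := nextPrime_correct _ d q hInv hwit
      have hp2 := primeI_two_le hpP
      have hfu2 : (n - p).toNat < fuel := by omega
      have hiff := innerA_correct n p hp2 n.toNat 0 (by omega) (le_refl 0) (by omega)
        (by intro k hk1 hk2; omega)
      simp only [pvOuterA, if_pos hPn, heq]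
      by_cases hInner : pvInnerA n p n.toNat 0 = true
      · rw [if_pos hInner]
        refine ⟨fun _ => ?_, fun _ => rfl⟩
        obtain ⟨k, hk1, hke⟩ := hiff.mp hInner
        exact ⟨p, k, hpP, hk1, hke⟩
      · have hInner' : pvInnerA n p n.toNat 0 = false := by
          simpa using hInner
        rw [if_neg hInner]
        have hcov' : ∀ r k : Int, PrimeI r → r < p + 1 → 1 ≤ k → r + 2 * k ^ 2 ≠ n := by
          intro r k hrP hrlt hk1 hke
          by_cases hrq : r < q
          · exact hcov r k hrP hrq hk1 hke
          · have hle : p ≤ r := hleast r hrP (by omega)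
            have hrp : r = p := by omega
            rw [hrp] at hke
            exact hInner (hiff.mpr ⟨k, hk1, hke⟩)
        exact ih d' (p + 1) p n hinv' (by omega) (by omega) (by omega) hcov' hfu2
    · simp only [pvOuterA, if_neg hPn, Bool.false_eq_true, false_iff]
      rintro ⟨r, k, hrP, hk1, hke⟩
      have hr2 := primeI_two_le hrP
      have hrn : r < n := by nlinarith
      exact hcov r k hrP (by omega) hk1 hke

theorem A_iff (n : Int) : IsGoldbachComposite n = true ↔ GoldB n := by
  unfold IsGoldbachComposite
  apply outerA_correct _ _ _ _ _ inv_empty (le_refl 0) (by omega) (by omega)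
  · intro r k hrP hrlt _ _
    exact absurd (primeI_two_le hrP) (by omega)
  · omega

-- ---------- B ----------

theorem trial_correct : ∀ (fuel : Nat) (m d : Int), 2 ≤ d → 0 ≤ m → (m - d).toNat < fuel →
    (pvTrial fuel m d = true ↔ ∀ e, d ≤ e → e * e ≤ m → ¬ (e ∣ m)) := by
  intro fuel
  induction fuel with
  | zero =>
    intro m d _ _ hfu
    exact absurd hfu (Nat.not_lt_zero _)
  | succ fuel ih =>
    intro m d hd2 hm0 hfu
    by_cases hdd : d * d ≤ m
    · have hmod : PySem.Int.mod m d = 0 ↔ d ∣ m := by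
        unfold PySem.Int.mod
        rw [Int.fmod_eq_emod, if_pos (Or.inl (by omega : (0:Int) ≤ d))]
        simp only [add_zero]
        exact ⟨Int.dvd_of_emod_eq_zero, Int.emod_eq_zero_of_dvd⟩
      by_cases hz : PySem.Int.mod m d = 0
      · simp only [pvTrial, if_pos hdd, if_pos hz, Bool.false_eq_true, false_iff]
        intro hall
        exact hall d (le_refl d) hdd (hmod.mp hz)
      · have h2d : 2 * d ≤ m := by nlinarith
        have hred : pvTrial (fuel + 1) m d = pvTrial fuel m (d + 1) := by
          simp only [pvTrial, if_pos hdd, if_neg hz]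
        rw [hred, ih m (d + 1) (by omega) hm0 (by omega)]
        constructor
        · intro hall e hde hee hdvd
          by_cases hed : e = d
          · rw [hed] at hdvd
            exact hz (hmod.mpr hdvd)
          · exact hall e (by omega) hee hdvd
        · intro hall e hde hee hdvd
          exact hall e (by omega) hee hdvd
    · simp only [pvTrial, if_neg hdd, true_iff]
      intro e hde hee hdvd
      nlinarith

theorem isPrimeB_correct (m : Int) : pvIsPrimeB m = true ↔ PrimeI m := by
  unfold pvIsPrimeB
  by_cases hm : m < 2
  · rw [if_pos hm]
    simp only [Bool.false_eq_true, false_iff]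
    intro hP
    exact absurd (primeI_two_le hP) (by omega)
  · rw [if_neg hm]
    rw [trial_correct (m.toNat + 2) m 2 (le_refl 2) (by omega) (by omega)]
    constructor
    · intro hall
      by_contra hnp
      obtain ⟨p, hp, hdvd, hsq⟩ := (not_primeI_iff (by omega)).mp hnp
      exact hall p (primeI_two_le hp) hsq hdvd
    · intro hP e he2 hee hdvd
      have hdn : e.toNat ∣ m.toNat := dvd_toNat (by omega) (by omega) hdvd
      rcases Nat.Prime.eq_one_or_self_of_dvd hP _ hdn with h1 | h1
      · omega
      · have : e = m := by omega
        subst this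
        nlinarith

theorem altLoop_correct (n : Int) : ∀ (fuel : Nat) (a : Int), 1 ≤ a →
    (∀ k, 1 ≤ k → k < a → ¬ (2 * k * k ≤ n - 2 ∧ PrimeI (n - 2 * k * k))) →
    (n - a).toNat < fuel →
    (pvAltLoop fuel n a = true ↔ ∃ k, 1 ≤ k ∧ 2 * k * k ≤ n - 2 ∧ PrimeI (n - 2 * k * k)) := by
  intro fuel
  induction fuel with
  | zero =>
    intro a _ _ hfu
    exact absurd hfu (Nat.not_lt_zero _)
  | succ fuel ih =>
    intro a ha1 hcov hfu
    by_cases hcond : 2 * a * a ≤ n - 2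
    · by_cases hp : pvIsPrimeB (n - 2 * a * a) = true
      · simp only [pvAltLoop, if_pos hcond, if_pos hp, true_iff]
        exact ⟨a, ha1, hcond, (isPrimeB_correct _).mp hp⟩
      · have h2a : 2 * a ≤ n - 2 := by nlinarith
        have hred : pvAltLoop (fuel + 1) n a = pvAltLoop fuel n (a + 1) := by
          simp only [pvAltLoop, if_pos hcond, if_neg hp]
        rw [hred, ih (a + 1) (by omega) ?_ (by omega)]
        · intro k hk1 hka
          by_cases hka' : k = a
          · rw [hka']
            rintro ⟨_, hPk⟩
            exact hp ((isPrimeB_correct _).mpr hPk)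
          · exact hcov k hk1 (by omega)
    · simp only [pvAltLoop, if_neg hcond, Bool.false_eq_true, false_iff]
      rintro ⟨k, hk1, hk2, _⟩
      by_cases hka : k < a
      · exact hcov k hk1 hka ⟨hk2, by assumption⟩
      · nlinarith

theorem B_iff (n : Int) : IsGoldbachComposite_alt n = true ↔ GoldB n := by
  unfold IsGoldbachComposite_alt
  rw [altLoop_correct n (n.toNat + 2) 1 (le_refl 1) (by intro k hk1 hk2; omega) (by omega)]
  constructor
  · rintro ⟨k, hk1, hk2, hkP⟩
    refine ⟨n - 2 * k * k, k, hkP, hk1, by ring⟩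
  · rintro ⟨p, k, hpP, hk1, hke⟩
    have hp2 := primeI_two_le hpP
    refine ⟨k, hk1, by nlinarith, ?_⟩
    have : n - 2 * k * k = p := by nlinarith
    rw [this]
    exact hpP

-- ===== VERDICT (by name: the statement is the Claim_ definition above) =====
theorem IsGoldbachComposite_spec : Claim_equal_IsGoldbachComposite := by
  intro n _
  unfold Spec_IsGoldbachComposite
  have := (A_iff n).trans (B_iff n).symm
  exact Bool.eq_iff_iff.mpr this
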